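-- pv_equiv track=rewrite | github.com/leungt30/slackfish | preprocess.py | piece_count
-- ===== SOURCE A (Python) =====
-- def piece_count(fen_str: str) -> int:
--     score_map = {
--         'p': -1,
--         'n': -3,
--         'b': -3,
--         'r': -5,
--         'q': -9,
--         'P': 1,
--         'N': 3,
--         'B': 3,
--         'R': 5,
--         'Q': 9,
--     }
--     total_score = 0
--     for peice in score_map.keys():
--         total_score += fen_str.count(peice) * score_map[peice]
--     return total_score
-- ===== SOURCE B (Python) =====
-- def piece_count(fen_str: str) -> int:
--     def value(c: str) -> int:
--         if c == 'p':
--             return -1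
--         if c == 'n' or c == 'b':
--             return -3
--         if c == 'r':
--             return -5
--         if c == 'q':
--             return -9
--         if c == 'P':
--             return 1
--         if c == 'N' or c == 'B':
--             return 3
--         if c == 'R':
--             return 5
--         if c == 'Q':
--             return 9
--         return 0
--     return sum(map(value, fen_str))
-- ===== Notes on version B (the rewrite author's own statement) =====
-- stated objective: simpler
-- what changed: A builds a score dict and scans the whole string once per piece key (ten str.count passes); B has no dict at all: a pure piecewise value(c) function and one sum(map(value, fen_str)) pass.
import Mathlib
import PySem

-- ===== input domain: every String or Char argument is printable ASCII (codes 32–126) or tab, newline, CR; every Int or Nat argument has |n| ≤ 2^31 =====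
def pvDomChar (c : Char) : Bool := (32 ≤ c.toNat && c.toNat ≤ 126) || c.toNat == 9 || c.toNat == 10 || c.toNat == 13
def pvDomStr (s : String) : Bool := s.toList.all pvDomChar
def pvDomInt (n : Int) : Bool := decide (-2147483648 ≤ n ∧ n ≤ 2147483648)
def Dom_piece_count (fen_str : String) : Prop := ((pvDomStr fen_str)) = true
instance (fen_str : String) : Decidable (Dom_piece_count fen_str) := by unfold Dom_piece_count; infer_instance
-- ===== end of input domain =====

-- B drops A's dict and its ten str.count passes: a pure piecewise value(c) function
-- summed in one pass over the characters; objective: simpler.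

-- ===== PORT A =====
-- the dict literal score_map (insertion order preserved)
def scoreMapA : PySem.Dict String Int :=
  ((((((((((PySem.Dict.empty.insert "p" (-1)).insert "n" (-3)).insert "b" (-3)).insert
    "r" (-5)).insert "q" (-9)).insert "P" 1).insert "N" 3).insert "B" 3).insert
    "R" 5).insert "Q" 9)

-- for peice in score_map.keys(): total_score += fen_str.count(peice) * score_map[peice]
def piece_count (fen_str : String) : Int :=
  scoreMapA.keys.foldl
    (fun total_score peice =>
      total_score + (PySem.Str.count fen_str peice : Int) * scoreMapA.getD peice 0) 0

-- ===== PORT B =====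
-- def value(c): the if-chain of Source B (a one-character str c becomes a Char)
def pcValue (c : Char) : Int :=
  if c = 'p' then -1
  else if c = 'n' ∨ c = 'b' then -3
  else if c = 'r' then -5
  else if c = 'q' then -9
  else if c = 'P' then 1
  else if c = 'N' ∨ c = 'B' then 3
  else if c = 'R' then 5
  else if c = 'Q' then 9
  else 0

-- return sum(map(value, fen_str))
def piece_count_alt (fen_str : String) : Int :=
  (fen_str.toList.map pcValue).sum

-- ===== PRECONDITION & SPEC =====
def Spec_piece_count (fen_str : String) (out : Int) : Prop := out = piece_count_alt fen_str
instance (fen_str : String) (out : Int) : Decidable (Spec_piece_count fen_str out) := by unfold Spec_piece_count; infer_instance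

-- ===== CLAIM (what is proved, stated in full; the proofs are below) =====
def Claim_equal_piece_count : Prop := ∀ (fen_str : String), Dom_piece_count fen_str → Spec_piece_count fen_str (piece_count fen_str)

-- ===== LEMMAS AND PROOFS =====

-- Python's str.count with a single-character needle is the per-character count.
lemma go_single (c : Char) (l : List Char) : ∀ (fuel acc : Nat), l.length ≤ fuel →
    PySem.Chars.count.go [c] fuel l acc = acc + l.count c := by
  induction l with
  | nil => intro fuel acc _; cases fuel <;> simp [PySem.Chars.count.go]
  | cons h t ih =>
    intro fuel acc hf
    cases fuel with
    | zero => simp at hf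
    | succ n =>
      simp only [PySem.Chars.count.go, List.isPrefixOf, List.count_cons, Bool.and_true,
        List.length_cons]
      have ht : t.length ≤ n := by simpa using hf
      by_cases hc : c = h
      · subst hc; simp [ih _ _ ht]; omega
      · have h1 : (c == h) = false := by simp [hc]
        have h2 : (h == c) = false := by simp [Ne.symm hc]
        simp [h1, h2, ih _ _ ht]

lemma count_single (s : String) (c : Char) :
    PySem.Str.count s (String.ofList [c]) = s.toList.count c := by
  have h1 : (String.ofList [c]).toList = [c] := by simp
  rw [PySem.Str.count_eq, h1, PySem.Chars.count]
  simp [go_single]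

lemma sum_w (l : List Char) : (l.map pcValue).sum =
    (l.count 'p' : Int) * (-1) + (l.count 'n' : Int) * (-3) + (l.count 'b' : Int) * (-3) +
    (l.count 'r' : Int) * (-5) + (l.count 'q' : Int) * (-9) + (l.count 'P' : Int) * 1 +
    (l.count 'N' : Int) * 3 + (l.count 'B' : Int) * 3 + (l.count 'R' : Int) * 5 +
    (l.count 'Q' : Int) * 9 := by
  induction l with
  | nil => simp
  | cons h t ih =>
    simp only [List.map_cons, List.sum_cons, List.count_cons, ih]
    push_cast
    by_cases h0 : h = 'p'
    · subst h0; simp [pcValue]; ring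
    by_cases h1 : h = 'n'
    · subst h1; simp [pcValue]; ring
    by_cases h2 : h = 'b'
    · subst h2; simp [pcValue]; ring
    by_cases h3 : h = 'r'
    · subst h3; simp [pcValue]; ring
    by_cases h4 : h = 'q'
    · subst h4; simp [pcValue]; ring
    by_cases h5 : h = 'P'
    · subst h5; simp [pcValue]; ring
    by_cases h6 : h = 'N'
    · subst h6; simp [pcValue]; ring
    by_cases h7 : h = 'B'
    · subst h7; simp [pcValue]; ring
    by_cases h8 : h = 'R'
    · subst h8; simp [pcValue]; ring
    by_cases h9 : h = 'Q'
    · subst h9; simp [pcValue]; ring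
    simp [pcValue, h0, h1, h2, h3, h4, h5, h6, h7, h8, h9]

-- ===== VERDICT (by name: the statement is the Claim_ definition above) =====
theorem piece_count_spec : Claim_equal_piece_count := by
  intro s _
  unfold Spec_piece_count piece_count_alt
  rw [sum_w]
  unfold piece_count
  have hk : scoreMapA.keys = ["p", "n", "b", "r", "q", "P", "N", "B", "R", "Q"] := by decide
  rw [hk]
  simp only [List.foldl]
  have cp : ("p" : String) = String.ofList ['p'] := by decide
  have cn : ("n" : String) = String.ofList ['n'] := by decide
  have cb : ("b" : String) = String.ofList ['b'] := by decide
  have cr : ("r" : String) = String.ofList ['r'] := by decide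
  have cq : ("q" : String) = String.ofList ['q'] := by decide
  have cP : ("P" : String) = String.ofList ['P'] := by decide
  have cN : ("N" : String) = String.ofList ['N'] := by decide
  have cB : ("B" : String) = String.ofList ['B'] := by decide
  have cR : ("R" : String) = String.ofList ['R'] := by decide
  have cQ : ("Q" : String) = String.ofList ['Q'] := by decide
  rw [cp, cn, cb, cr, cq, cP, cN, cB, cR, cQ]
  simp only [count_single]
  have g0 : scoreMapA.getD (String.ofList ['p']) 0 = (-1 : Int) := by decide
  have g1 : scoreMapA.getD (String.ofList ['n']) 0 = (-3 : Int) := by decide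
  have g2 : scoreMapA.getD (String.ofList ['b']) 0 = (-3 : Int) := by decide
  have g3 : scoreMapA.getD (String.ofList ['r']) 0 = (-5 : Int) := by decide
  have g4 : scoreMapA.getD (String.ofList ['q']) 0 = (-9 : Int) := by decide
  have g5 : scoreMapA.getD (String.ofList ['P']) 0 = (1 : Int) := by decide
  have g6 : scoreMapA.getD (String.ofList ['N']) 0 = (3 : Int) := by decide
  have g7 : scoreMapA.getD (String.ofList ['B']) 0 = (3 : Int) := by decide
  have g8 : scoreMapA.getD (String.ofList ['R']) 0 = (5 : Int) := by decide
  have g9 : scoreMapA.getD (String.ofList ['Q']) 0 = (9 : Int) := by decide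
  rw [g0, g1, g2, g3, g4, g5, g6, g7, g8, g9]
  ring
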